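-- pv_equiv track=rewrite | github.com/b-cheek/Miscellaneous | flexPatterns/flexPatterns.py | tessitura
-- ===== SOURCE A (Python) =====
-- def tessitura(seq):
--     max = min = cur = 0
--     for i in seq:
--         cur += i
--         if cur > max:
--             max = cur
--         if cur < min:
--             min = cur
--     return max - min
-- ===== SOURCE B (Python) =====
-- def tessitura(seq):
--     # Divide and conquer: rng(s) returns (total sum of s,
--     # max prefix sum of s incl. empty prefix, min prefix sum incl. empty prefix).
--     def rng(s):
--         if not s:
--             return (0, 0, 0)
--         if len(s) == 1:
--             x = s[0]
--             return (x, max(x, 0), min(x, 0))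
--         mid = len(s) // 2
--         t1, m1, n1 = rng(s[:mid])
--         t2, m2, n2 = rng(s[mid:])
--         return (t1 + t2, max(m1, t1 + m2), min(n1, t1 + n2))
--     t, m, n = rng(seq)
--     return m - n
-- ===== Notes on version B (the rewrite author's own statement) =====
-- stated objective: alternative
-- what changed: Replaces A's single left-to-right scan tracking running max/min with a divide-and-conquer recursion that splits the list in half and merges (total, maxPrefix, minPrefix) triples via (t1+t2, max(m1,t1+m2), min(n1,t1+n2)).
import Mathlib
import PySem

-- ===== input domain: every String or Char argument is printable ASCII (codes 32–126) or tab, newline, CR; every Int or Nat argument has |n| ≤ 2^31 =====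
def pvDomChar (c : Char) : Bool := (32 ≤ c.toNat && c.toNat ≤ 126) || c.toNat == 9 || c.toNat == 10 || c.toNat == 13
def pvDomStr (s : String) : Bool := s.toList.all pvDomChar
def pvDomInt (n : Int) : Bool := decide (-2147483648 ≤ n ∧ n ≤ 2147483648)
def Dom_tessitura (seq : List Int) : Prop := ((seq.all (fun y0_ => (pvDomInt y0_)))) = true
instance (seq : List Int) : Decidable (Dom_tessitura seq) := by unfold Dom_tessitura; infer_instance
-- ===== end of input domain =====

-- B computes the range of prefix sums by divide-and-conquer on halves, merging (sum, maxPrefix, minPrefix) triples, instead of A's interleaved single scan; an alternative algorithm, not faster.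


-- ===== PORT A =====
-- loop over seq carrying (max, min, cur), exactly A's state
def tessLoop (seq : List Int) (s : Int × Int × Int) : Int × Int × Int :=
  match seq with
  | [] => s
  | i :: t =>
    let cur := s.2.2 + i
    tessLoop t (if cur > s.1 then cur else s.1, if cur < s.2.1 then cur else s.2.1, cur)

def tessitura (seq : List Int) : Int :=
  let s := tessLoop seq (0, 0, 0)
  s.1 - s.2.1

-- ===== PORT B =====
-- rng(s) of Source B: (total sum, max prefix sum incl. empty, min prefix sum incl. empty),
-- computed by splitting at len//2 and merging the two triples
def tessRng (s : List Int) : Int × Int × Int :=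
  match s with
  | [] => (0, 0, 0)
  | [x] => (x, max x 0, min x 0)
  | x :: y :: t =>
    let mid := (x :: y :: t).length / 2
    let p := tessRng ((x :: y :: t).take mid)
    let q := tessRng ((x :: y :: t).drop mid)
    (p.1 + q.1, max p.2.1 (p.1 + q.2.1), min p.2.2 (p.1 + q.2.2))
termination_by s.length
decreasing_by
  · simp [List.length_take]; omega
  · simp [List.length_drop]; omega

def tessitura_alt (seq : List Int) : Int :=
  let r := tessRng seq
  r.2.1 - r.2.2

-- ===== PRECONDITION & SPEC =====
def Spec_tessitura (seq : List Int) (out : Int) : Prop := out = tessitura_alt seq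
instance (seq : List Int) (out : Int) : Decidable (Spec_tessitura seq out) := by unfold Spec_tessitura; infer_instance

-- ===== CLAIM =====
def Claim_equal_tessitura : Prop := ∀ (seq : List Int), Dom_tessitura seq → Spec_tessitura seq (tessitura seq)

-- ===== LEMMAS AND PROOFS =====

-- max/min prefix sum (empty prefix included), the mathematical reference
def maxp : List Int → Int
  | [] => 0
  | x :: t => max 0 (x + maxp t)

def minp : List Int → Int
  | [] => 0
  | x :: t => min 0 (x + minp t)

lemma maxp_nonneg (l : List Int) : 0 ≤ maxp l := by
  cases l <;> simp [maxp]

lemma minp_nonpos (l : List Int) : minp l ≤ 0 := by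
  cases l <;> simp [minp]

lemma maxp_append (xs ys : List Int) :
    maxp (xs ++ ys) = max (maxp xs) (xs.sum + maxp ys) := by
  induction xs with
  | nil => simp [maxp, maxp_nonneg]
  | cons x t ih => simp [maxp, ih, List.sum_cons]; omega

lemma minp_append (xs ys : List Int) :
    minp (xs ++ ys) = min (minp xs) (xs.sum + minp ys) := by
  induction xs with
  | nil => simp [minp, minp_nonpos]
  | cons x t ih => simp [minp, ih, List.sum_cons]; omega

lemma tessRng_eq (s : List Int) : tessRng s = (s.sum, maxp s, minp s) := by
  induction s using tessRng.induct with
  | case1 => simp [tessRng, maxp, minp]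
  | case2 x => simp [tessRng, maxp, minp]; omega
  | case3 x y t mid ih1 ih2 =>
    rw [tessRng, ih1, ih2]
    simp only [Prod.mk.injEq]
    have h := List.take_append_drop mid (x :: y :: t)
    refine ⟨?_, ?_, ?_⟩
    · conv_rhs => rw [← h]
      rw [List.sum_append]
    · conv_rhs => rw [← h]
      rw [maxp_append]
    · conv_rhs => rw [← h]
      rw [minp_append]

lemma tessLoop_eq (xs : List Int) : ∀ (m n c : Int), c ≤ m → n ≤ c →
    tessLoop xs (m, n, c) = (max m (c + maxp xs), min n (c + minp xs), c + xs.sum) := by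
  induction xs with
  | nil => intro m n c hm hn; simp [tessLoop, maxp, minp]; omega
  | cons x t ih =>
    intro m n c hm hn
    have hM : 0 ≤ maxp t := maxp_nonneg t
    have hN : minp t ≤ 0 := minp_nonpos t
    simp only [tessLoop]
    rw [show (if c + x > m then c + x else m) = max m (c + x) by omega,
        show (if c + x < n then c + x else n) = min n (c + x) by omega,
        ih _ _ _ (le_max_right _ _) (min_le_right _ _)]
    simp only [maxp, minp, List.sum_cons, Prod.mk.injEq]
    refine ⟨by omega, by omega, by omega⟩

-- ===== VERDICT =====
theorem tessitura_spec : Claim_equal_tessitura := by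
  intro seq _
  unfold Spec_tessitura tessitura tessitura_alt
  rw [tessLoop_eq seq 0 0 0 le_rfl le_rfl, tessRng_eq]
  have := maxp_nonneg seq
  have := minp_nonpos seq
  simp; omega
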